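-- pv_equiv track=rewrite | github.com/itsmariodias/AdventOfCode | Day 12/part1.py | get_group_size
-- ===== SOURCE A (Python) =====
-- def get_group_size(condition_record):
--     group_size = []
--     size = 0
--     for condition in condition_record:
--         if condition == '#':
--             size += 1
--         elif size > 0:
--             group_size.append(size)
--             size = 0
--     if size > 0:
--         group_size.append(size)
--     return group_size
-- ===== SOURCE B (Python) =====
-- def get_group_size(condition_record):
--     record = list(condition_record)
--     n = len(record)
--     groups = []
--     i = 0
--     while i < n:
--         c = record[i]
--         j = i + 1
--         while j < n and record[j] == c:
--             j += 1
--         if c == '#':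
--             groups.append(j - i)
--         i = j
--     return groups
-- ===== Notes on version B (the rewrite author's own statement) =====
-- stated objective: alternative
-- what changed: B replaces A's running size counter with flush-on-boundary by a two-pointer run scanner that extracts each maximal run of equal characters in one jump and emits the run length for the hash-marked runs.
import Mathlib
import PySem

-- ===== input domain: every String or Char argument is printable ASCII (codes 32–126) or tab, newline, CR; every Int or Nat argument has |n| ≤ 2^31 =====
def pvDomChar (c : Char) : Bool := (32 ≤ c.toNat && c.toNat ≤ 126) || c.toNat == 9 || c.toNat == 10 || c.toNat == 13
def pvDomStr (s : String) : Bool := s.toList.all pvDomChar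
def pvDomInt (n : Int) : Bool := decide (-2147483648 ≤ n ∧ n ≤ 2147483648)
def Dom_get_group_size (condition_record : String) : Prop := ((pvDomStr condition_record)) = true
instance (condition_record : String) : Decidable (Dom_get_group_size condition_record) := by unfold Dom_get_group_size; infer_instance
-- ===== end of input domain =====

-- B scans maximal runs of equal characters with a two-pointer jump instead of A's running counter; objective: alternative decomposition, same cost.


-- ===== PORT A =====
-- A: one pass with a running counter `size`, flushed to the list at each non-'#' boundary and at the end.
def gLoopA : List Char → List Int → Int → List Int
  | [], acc, size => if size > 0 then acc ++ [size] else acc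
  | c :: rest, acc, size =>
      if c = '#' then gLoopA rest acc (size + 1)
      else if size > 0 then gLoopA rest (acc ++ [size]) 0
      else gLoopA rest acc 0

def get_group_size (condition_record : String) : List Int :=
  gLoopA condition_record.toList [] 0

-- ===== PORT B =====
-- B: extract each maximal run (inner while = takeWhile/dropWhile), emit its length when the run char is '#'.
def scanRuns : List Char → List Int
  | [] => []
  | c :: rest =>
      let run := rest.takeWhile (· = c)
      let tail := rest.dropWhile (· = c)
      if c = '#' then ((run.length + 1 : Nat) : Int) :: scanRuns tail
      else scanRuns tail
termination_by l => l.length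
decreasing_by
  all_goals
    simp only [List.length_cons]
    have h := List.length_dropWhile_le (fun x => decide (x = c)) rest
    omega

def get_group_size_alt (condition_record : String) : List Int :=
  scanRuns condition_record.toList

-- ===== PRECONDITION & SPEC =====
def Spec_get_group_size (condition_record : String) (out : List Int) : Prop := out = get_group_size_alt condition_record
instance (condition_record : String) (out : List Int) : Decidable (Spec_get_group_size condition_record out) := by unfold Spec_get_group_size; infer_instance

-- ===== CLAIM (what is proved, stated in full; the proofs are below) =====
def Claim_equal_get_group_size : Prop := ∀ (condition_record : String), Dom_get_group_size condition_record → Spec_get_group_size condition_record (get_group_size condition_record)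

-- ===== LEMMAS AND PROOFS =====

theorem gLoopA_acc (l : List Char) : ∀ (acc : List Int) (size : Int),
    gLoopA l acc size = acc ++ gLoopA l [] size := by
  induction l with
  | nil => intro acc size; simp [gLoopA]; split <;> simp
  | cons c rest ih =>
      intro acc size
      simp only [gLoopA]
      split
      · exact ih acc (size + 1)
      · split
        · rw [ih (acc ++ [size]) 0]
          rw [ih ([] ++ [size]) 0]
          simp
        · exact ih acc 0

theorem takeWhile_head_nil {x : Char} {t : List Char}
    (ht : ∀ y, t.head? = some y → y ≠ x) : t.takeWhile (· = x) = [] := by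
  cases t with
  | nil => rfl
  | cons a t' =>
      have : a ≠ x := ht a rfl
      simp [List.takeWhile, this]

theorem dropWhile_head_self {x : Char} {t : List Char}
    (ht : ∀ y, t.head? = some y → y ≠ x) : t.dropWhile (· = x) = t := by
  cases t with
  | nil => rfl
  | cons a t' =>
      have : a ≠ x := ht a rfl
      simp [List.dropWhile, this]

theorem tw_rep (x : Char) (m : Nat) (t : List Char) :
    (List.replicate m x ++ t).takeWhile (· = x) = List.replicate m x ++ t.takeWhile (· = x) := by
  induction m with
  | zero => simp
  | succ k ih => simp [List.replicate_succ, ih]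

theorem dw_rep (x : Char) (m : Nat) (t : List Char) :
    (List.replicate m x ++ t).dropWhile (· = x) = t.dropWhile (· = x) := by
  induction m with
  | zero => simp
  | succ k ih => simp [List.replicate_succ, ih]

theorem scanRuns_rep (x : Char) (m : Nat) (t : List Char)
    (ht : ∀ y, t.head? = some y → y ≠ x) :
    scanRuns (List.replicate m x ++ t)
      = (if m ≠ 0 ∧ x = '#' then [(m : Int)] else []) ++ scanRuns t := by
  cases m with
  | zero => simp
  | succ k =>
      have htw := takeWhile_head_nil ht
      have hdw := dropWhile_head_self ht
      rw [List.replicate_succ, List.cons_append]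
      rw [scanRuns]
      simp only [tw_rep, dw_rep, htw, hdw, List.append_nil, List.length_replicate]
      by_cases hx : x = '#'
      · simp [hx]
      · simp [hx]

theorem takeWhile_eq_replicate (x : Char) (l : List Char) :
    l.takeWhile (· = x) = List.replicate (l.takeWhile (· = x)).length x := by
  induction l with
  | nil => rfl
  | cons a l' ih =>
      by_cases h : a = x
      · simp [List.takeWhile, h, List.replicate_succ, ← ih]
      · simp [List.takeWhile, h]

theorem head_dropWhile_ne (x : Char) (l : List Char) :
    ∀ y, (l.dropWhile (· = x)).head? = some y → y ≠ x := by
  induction l with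
  | nil => intro y h; simp [List.dropWhile] at h
  | cons a l' ih =>
      intro y h
      by_cases ha : a = x
      · simp [List.dropWhile, ha] at h; exact ih y h
      · simp [List.dropWhile, ha] at h; cases h; exact ha

-- run of a non-'#' char contributes nothing: prepending it is invisible to scanRuns
theorem scanRuns_cons_ne (c : Char) (rest : List Char) (hc : c ≠ '#') :
    scanRuns (c :: rest) = scanRuns rest := by
  rw [scanRuns]
  simp only [hc, if_false]
  conv_rhs =>
    rw [← List.takeWhile_append_dropWhile (p := (· = c)) (l := rest)]
    rw [takeWhile_eq_replicate c rest]
  rw [scanRuns_rep c _ _ (head_dropWhile_ne c rest)]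
  simp [hc]

theorem main_lemma (l : List Char) : ∀ n : Nat,
    gLoopA l [] (n : Int) = scanRuns (List.replicate n '#' ++ l) := by
  induction l with
  | nil =>
      intro n
      rw [scanRuns_rep '#' n [] (by intro y h; simp at h)]
      rw [gLoopA]
      cases n with
      | zero => simp [scanRuns]
      | succ k => simp [scanRuns]
  | cons c rest ih =>
      intro n
      by_cases hc : c = '#'
      · rw [gLoopA]
        simp only [hc, if_true]
        have : ((n : Int) + 1) = ((n + 1 : Nat) : Int) := by push_cast; ring
        rw [this, ih (n + 1)]
        congr 1
        rw [List.replicate_succ', List.append_assoc]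
        simp
      · rw [gLoopA]
        simp only [hc, if_false]
        have hhead : ∀ y, (c :: rest).head? = some y → y ≠ '#' := by
          intro y h; simp at h; rw [← h]; exact hc
        rw [scanRuns_rep '#' n (c :: rest) hhead, scanRuns_cons_ne c rest hc]
        cases n with
        | zero =>
            simp only [Nat.cast_zero, lt_irrefl]
            simpa using ih 0
        | succ k =>
            rw [if_pos (by push_cast; omega)]
            simp only [List.nil_append]
            rw [gLoopA_acc rest [(↑(k+1) : Int)] 0]
            have := ih 0
            simp at this
            simp [this]

-- ===== VERDICT (by name: the statement is the Claim_ definition above) =====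
theorem get_group_size_spec : Claim_equal_get_group_size := by
  intro s _
  unfold Spec_get_group_size get_group_size get_group_size_alt
  have := main_lemma s.toList 0
  simpa using this
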